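-- pv_equiv track=rewrite | github.com/daniel-reich/ubiquitous-fiesta | hpJsoWBBHWKZ9NcAi_21.py | bird_code
-- ===== SOURCE A (Python) =====
-- def bird_code(lst):
--   bnames=[]
--   for name in lst:
--     ltmp = name.replace("-"," ").split()
--     if len(ltmp) == 1 : bnames.append(ltmp[0][:4].upper())
--     if len(ltmp) == 2 : bnames.append(ltmp[0][:2].upper()+ltmp[1][:2].upper())
--     if len(ltmp) == 3 : bnames.append(ltmp[0][:1].upper()+ltmp[1][:1].upper()+ltmp[2][:2].upper())
--     if len(ltmp) == 4 : bnames.append(ltmp[0][:1].upper()+ltmp[1][:1].upper()+ltmp[2][:1].upper()+ltmp[3][:1].upper())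
--   return bnames
-- ===== SOURCE B (Python) =====
-- def bird_code(lst):
--   result = []
--   for name in lst:
--     words = name.replace("-", " ").split()
--     n = len(words)
--     if 1 <= n <= 4:
--       code = ""
--       for i, word in enumerate(words):
--         cnt = 4 // n + (1 if i >= n - 4 % n else 0)
--         code += word[:cnt].upper()
--       result.append(code)
--   return result
-- ===== Notes on version B (the rewrite author's own statement) =====
-- stated objective: simpler
-- what changed: Replaces the four enumerated length cases by one even-distribution formula (each word gets 4//n letters, the last 4%n words one extra) with a single inner loop.
import Mathlib
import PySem

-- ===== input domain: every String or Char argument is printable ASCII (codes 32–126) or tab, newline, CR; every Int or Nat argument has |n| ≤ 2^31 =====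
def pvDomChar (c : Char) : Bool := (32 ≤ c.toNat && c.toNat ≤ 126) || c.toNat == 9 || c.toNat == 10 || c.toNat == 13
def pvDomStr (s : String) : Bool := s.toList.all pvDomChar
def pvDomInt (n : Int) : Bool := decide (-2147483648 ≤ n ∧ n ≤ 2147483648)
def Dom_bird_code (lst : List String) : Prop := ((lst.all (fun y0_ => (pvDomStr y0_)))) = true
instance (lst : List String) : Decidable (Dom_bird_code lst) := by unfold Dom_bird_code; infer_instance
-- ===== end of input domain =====

-- B replaces A's four enumerated word-count cases by one even-distribution formula
-- (each word contributes 4//n letters, the last 4%n words one extra): simpler.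

-- ===== PORT A =====
def bird_code (lst : List String) : List String :=
  lst.foldl (fun bnames name =>
    let ltmp := PySem.Str.split₀ (PySem.Str.replace name "-" " ")
    let bnames := if ltmp.length = 1 then
        bnames ++ [PySem.Str.upper (PySem.Str.slice (ltmp.getD 0 "") none (some 4))] else bnames
    let bnames := if ltmp.length = 2 then
        bnames ++ [PySem.Str.upper (PySem.Str.slice (ltmp.getD 0 "") none (some 2)) ++
                   PySem.Str.upper (PySem.Str.slice (ltmp.getD 1 "") none (some 2))] else bnames
    let bnames := if ltmp.length = 3 then
        bnames ++ [PySem.Str.upper (PySem.Str.slice (ltmp.getD 0 "") none (some 1)) ++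
                   PySem.Str.upper (PySem.Str.slice (ltmp.getD 1 "") none (some 1)) ++
                   PySem.Str.upper (PySem.Str.slice (ltmp.getD 2 "") none (some 2))] else bnames
    let bnames := if ltmp.length = 4 then
        bnames ++ [PySem.Str.upper (PySem.Str.slice (ltmp.getD 0 "") none (some 1)) ++
                   PySem.Str.upper (PySem.Str.slice (ltmp.getD 1 "") none (some 1)) ++
                   PySem.Str.upper (PySem.Str.slice (ltmp.getD 2 "") none (some 1)) ++
                   PySem.Str.upper (PySem.Str.slice (ltmp.getD 3 "") none (some 1))] else bnames
    bnames) []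

-- ===== PORT B =====
def bird_code_alt (lst : List String) : List String :=
  lst.foldl (fun result name =>
    let words := PySem.Str.split₀ (PySem.Str.replace name "-" " ")
    let n : Int := words.length
    if 1 ≤ n ∧ n ≤ 4 then
      let code := (PySem.List.enumerate words).foldl (fun code iw =>
        let cnt : Int := PySem.Int.floordiv 4 n +
          (if iw.1 ≥ n - PySem.Int.mod 4 n then 1 else 0)
        code ++ PySem.Str.upper (PySem.Str.slice iw.2 none (some cnt))) ""
      result ++ [code]
    else result) []

-- ===== PRECONDITION & SPEC =====
def Spec_bird_code (lst : List String) (out : List String) : Prop := out = bird_code_alt lst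
instance (lst : List String) (out : List String) : Decidable (Spec_bird_code lst out) := by unfold Spec_bird_code; infer_instance

-- ===== CLAIM (what is proved, stated in full; the proofs are below) =====
def Claim_equal_bird_code : Prop := ∀ (lst : List String), Dom_bird_code lst → Spec_bird_code lst (bird_code lst)

-- ===== LEMMAS AND PROOFS =====

-- the per-name steps of the two folds agree
theorem bird_code_step_eq (acc : List String) (name : String) :
    (fun bnames name =>
      let ltmp := PySem.Str.split₀ (PySem.Str.replace name "-" " ")
      let bnames := if ltmp.length = 1 then
          bnames ++ [PySem.Str.upper (PySem.Str.slice (ltmp.getD 0 "") none (some 4))] else bnames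
      let bnames := if ltmp.length = 2 then
          bnames ++ [PySem.Str.upper (PySem.Str.slice (ltmp.getD 0 "") none (some 2)) ++
                     PySem.Str.upper (PySem.Str.slice (ltmp.getD 1 "") none (some 2))] else bnames
      let bnames := if ltmp.length = 3 then
          bnames ++ [PySem.Str.upper (PySem.Str.slice (ltmp.getD 0 "") none (some 1)) ++
                     PySem.Str.upper (PySem.Str.slice (ltmp.getD 1 "") none (some 1)) ++
                     PySem.Str.upper (PySem.Str.slice (ltmp.getD 2 "") none (some 2))] else bnames
      let bnames := if ltmp.length = 4 then
          bnames ++ [PySem.Str.upper (PySem.Str.slice (ltmp.getD 0 "") none (some 1)) ++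
                     PySem.Str.upper (PySem.Str.slice (ltmp.getD 1 "") none (some 1)) ++
                     PySem.Str.upper (PySem.Str.slice (ltmp.getD 2 "") none (some 1)) ++
                     PySem.Str.upper (PySem.Str.slice (ltmp.getD 3 "") none (some 1))] else bnames
      bnames) acc name =
    (fun result name =>
      let words := PySem.Str.split₀ (PySem.Str.replace name "-" " ")
      let n : Int := words.length
      if 1 ≤ n ∧ n ≤ 4 then
        let code := (PySem.List.enumerate words).foldl (fun code iw =>
          let cnt : Int := PySem.Int.floordiv 4 n +
            (if iw.1 ≥ n - PySem.Int.mod 4 n then 1 else 0)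
          code ++ PySem.Str.upper (PySem.Str.slice iw.2 none (some cnt))) ""
        result ++ [code]
      else result) acc name := by
  simp only
  match PySem.Str.split₀ (PySem.Str.replace name "-" " ") with
  | [] => simp
  | [a] => simp [PySem.List.enumerate, PySem.Int.floordiv, PySem.Int.mod]
  | [a, b] => simp [PySem.List.enumerate, PySem.Int.floordiv, PySem.Int.mod]
  | [a, b, c] => simp [PySem.List.enumerate, PySem.Int.floordiv, PySem.Int.mod]
  | [a, b, c, d] => simp [PySem.List.enumerate, PySem.Int.floordiv, PySem.Int.mod, String.append_assoc]
  | a :: b :: c :: d :: e :: t =>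
      simp only [List.length_cons]
      have h1 : ¬ (t.length + 1 + 1 + 1 + 1 + 1 = 1) := by omega
      have h4 : ¬ (t.length + 1 + 1 + 1 + 1 + 1 = 4) := by omega
      have hn : ¬ ((1 : Int) ≤ (t.length + 1 + 1 + 1 + 1 + 1 : Nat) ∧
          ((t.length + 1 + 1 + 1 + 1 + 1 : Nat) : Int) ≤ 4) := by push_cast; omega
      simp [h4, hn]
      omega

-- two folds with pointwise-equal step functions agree
theorem pv_foldl_ext {α β : Type} (f g : β → α → β) (h : ∀ b a, f b a = g b a) :
    ∀ (l : List α) (b : β), l.foldl f b = l.foldl g b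
  | [], _ => rfl
  | a :: l, b => by rw [List.foldl_cons, List.foldl_cons, h]; exact pv_foldl_ext f g h l _

-- ===== VERDICT (by name: the statement is the Claim_ definition above) =====
theorem bird_code_spec : Claim_equal_bird_code := by
  intro lst _
  unfold Spec_bird_code bird_code bird_code_alt
  exact pv_foldl_ext _ _ bird_code_step_eq lst []
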